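-- pv_equiv track=rewrite | github.com/sudeepshm/runMed | backend01/app/services/vcf_parser.py | _map_to_pharmacogene
-- ===== SOURCE A (Python) =====
-- from typing import Dict, List, Optional, Set, Tuple
--
-- PHARMACOGENE_REGIONS: Dict[str, List[Tuple[int, int, str]]] = {
--     # chromosome → [(start, end, gene), ...]
--     "chr10": [
--         (94_727_000, 94_833_000, "CYP2C9"),   # CYP2C9
--         (96_445_000, 96_615_000, "CYP2C19"),   # CYP2C19
--     ],
--     "chr13": [
--         (48_004_000, 48_101_000, "DPYD"),      # DPYD
--     ],
--     "chr16": [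
--         (31_090_000, 31_120_000, "VKORC1"),    # VKORC1
--     ],
--     "chr22": [
--         (42_120_000, 42_140_000, "CYP2D6"),    # CYP2D6
--     ],
--     "chr7": [
--         (99_648_000, 99_700_000, "CYP3A5"),    # CYP3A5
--     ],
--     "chr6": [
--         (18_128_000, 18_155_000, "TPMT"),      # TPMT
--     ],
--     "chr12": [
--         (21_130_000, 21_240_000, "SLCO1B1"),   # SLCO1B1
--     ],
-- }
--
-- KNOWN_PGX_RSIDS: Set[str] = {
--     # CYP2D6
--     "rs3892097", "rs1065852", "rs1135840", "rs16947", "rs28371725",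
--     "rs5030655", "rs5030656", "rs28371706", "rs59421388",
--     # CYP2C19
--     "rs12248560", "rs4244285", "rs4986893", "rs28399504", "rs56337013",
--     # CYP2C9
--     "rs1799853", "rs1057910", "rs28371686", "rs7900194", "rs9332131",
--     # CYP3A5
--     "rs776746",
--     # DPYD
--     "rs3918290", "rs55886062", "rs67376798", "rs75017182",
--     # TPMT
--     "rs1142345", "rs1800460", "rs1800462",
--     # SLCO1B1
--     "rs4149056", "rs2306283",
--     # VKORC1
--     "rs9923231", "rs116855232",
-- }
--
-- def _map_to_pharmacogene(chrom: str, pos: int, rsid: str) -> str: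
--     """
--     Map a variant to a pharmacogene by:
--       1. Known rsID lookup (fast path)
--       2. Coordinate-based region lookup (fallback)
--     """
--     # Fast path: known rsID
--     if rsid in KNOWN_PGX_RSIDS:
--         # Still need to find the gene name
--         regions = PHARMACOGENE_REGIONS.get(chrom, [])
--         for start, end, gene in regions:
--             if start <= pos <= end:
--                 return gene
--         # rsID is known but coordinates don't match a region —
--         # return a best-effort gene from the rsID-to-gene map
--         return _rsid_to_gene(rsid)
--
--     # Coordinate-based lookup
--     regions = PHARMACOGENE_REGIONS.get(chrom, [])
--     for start, end, gene in regions: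
--         if start <= pos <= end:
--             return gene
--
--     return ""
--
-- def _rsid_to_gene(rsid: str) -> str:
--     """Fallback rsID → gene mapping for known PGx variants."""
--     _MAP = {
--         # CYP2D6
--         "rs3892097": "CYP2D6", "rs1065852": "CYP2D6", "rs1135840": "CYP2D6",
--         "rs16947": "CYP2D6", "rs28371725": "CYP2D6", "rs5030655": "CYP2D6",
--         "rs5030656": "CYP2D6", "rs28371706": "CYP2D6", "rs59421388": "CYP2D6",
--         # CYP2C19
--         "rs12248560": "CYP2C19", "rs4244285": "CYP2C19",
--         "rs4986893": "CYP2C19", "rs28399504": "CYP2C19", "rs56337013": "CYP2C19",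
--         # CYP2C9
--         "rs1799853": "CYP2C9", "rs1057910": "CYP2C9", "rs28371686": "CYP2C9",
--         "rs7900194": "CYP2C9", "rs9332131": "CYP2C9",
--         # CYP3A5
--         "rs776746": "CYP3A5",
--         # DPYD
--         "rs3918290": "DPYD", "rs55886062": "DPYD",
--         "rs67376798": "DPYD", "rs75017182": "DPYD",
--         # TPMT
--         "rs1142345": "TPMT", "rs1800460": "TPMT", "rs1800462": "TPMT",
--         # SLCO1B1
--         "rs4149056": "SLCO1B1", "rs2306283": "SLCO1B1",
--         # VKORC1
--         "rs9923231": "VKORC1", "rs116855232": "VKORC1",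
--     }
--     return _MAP.get(rsid, "")
-- ===== SOURCE B (Python) =====
-- from typing import Dict, List, Tuple
--
-- PHARMACOGENE_REGIONS: Dict[str, List[Tuple[int, int, str]]] = {
--     "chr10": [
--         (94_727_000, 94_833_000, "CYP2C9"),
--         (96_445_000, 96_615_000, "CYP2C19"),
--     ],
--     "chr13": [(48_004_000, 48_101_000, "DPYD")],
--     "chr16": [(31_090_000, 31_120_000, "VKORC1")],
--     "chr22": [(42_120_000, 42_140_000, "CYP2D6")],
--     "chr7": [(99_648_000, 99_700_000, "CYP3A5")],
--     "chr6": [(18_128_000, 18_155_000, "TPMT")],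
--     "chr12": [(21_130_000, 21_240_000, "SLCO1B1")],
-- }
--
-- _RSID_TO_GENE: Dict[str, str] = {
--     "rs3892097": "CYP2D6", "rs1065852": "CYP2D6", "rs1135840": "CYP2D6",
--     "rs16947": "CYP2D6", "rs28371725": "CYP2D6", "rs5030655": "CYP2D6",
--     "rs5030656": "CYP2D6", "rs28371706": "CYP2D6", "rs59421388": "CYP2D6",
--     "rs12248560": "CYP2C19", "rs4244285": "CYP2C19",
--     "rs4986893": "CYP2C19", "rs28399504": "CYP2C19", "rs56337013": "CYP2C19",
--     "rs1799853": "CYP2C9", "rs1057910": "CYP2C9", "rs28371686": "CYP2C9",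
--     "rs7900194": "CYP2C9", "rs9332131": "CYP2C9",
--     "rs776746": "CYP3A5",
--     "rs3918290": "DPYD", "rs55886062": "DPYD",
--     "rs67376798": "DPYD", "rs75017182": "DPYD",
--     "rs1142345": "TPMT", "rs1800460": "TPMT", "rs1800462": "TPMT",
--     "rs4149056": "SLCO1B1", "rs2306283": "SLCO1B1",
--     "rs9923231": "VKORC1", "rs116855232": "VKORC1",
-- }
--
-- def _map_to_pharmacogene(chrom: str, pos: int, rsid: str) -> str:
--     """Binary search the sorted, disjoint region list for the rightmost start <= pos;
--     a variant lies in at most that one region.  Fall back to the rsID->gene map,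
--     which is empty exactly on unknown rsIDs."""
--     regions = PHARMACOGENE_REGIONS.get(chrom, [])
--     lo, hi = 0, len(regions)
--     while lo < hi:
--         mid = (lo + hi) // 2
--         if regions[mid][0] <= pos:
--             lo = mid + 1
--         else:
--             hi = mid
--     if lo > 0:
--         start, end, gene = regions[lo - 1]
--         if pos <= end:
--             return gene
--     return _RSID_TO_GENE.get(rsid, "")
-- ===== Notes on version B (the rewrite author's own statement) =====
-- stated objective: alternative
-- what changed: B replaces A's duplicated early-return linear region scans gated on a set membership test by a hand-rolled binary search (rightmost region start <= pos, then one end check) over the sorted disjoint region list, with a single rsID-map fallback that is empty exactly on unknown rsIDs.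
import Mathlib
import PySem

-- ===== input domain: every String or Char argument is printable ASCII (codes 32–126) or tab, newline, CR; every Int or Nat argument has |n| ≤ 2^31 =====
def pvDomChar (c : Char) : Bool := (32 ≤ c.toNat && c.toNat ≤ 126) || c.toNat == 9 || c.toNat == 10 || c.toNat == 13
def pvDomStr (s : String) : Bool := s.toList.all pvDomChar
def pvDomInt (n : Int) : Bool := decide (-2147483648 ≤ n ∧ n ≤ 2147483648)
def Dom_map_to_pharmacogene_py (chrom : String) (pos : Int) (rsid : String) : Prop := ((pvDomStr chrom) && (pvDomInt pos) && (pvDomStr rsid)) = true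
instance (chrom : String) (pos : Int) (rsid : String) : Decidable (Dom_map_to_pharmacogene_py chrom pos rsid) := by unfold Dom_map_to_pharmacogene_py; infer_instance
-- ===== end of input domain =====

-- B replaces A's duplicated linear region scans (gated on a set membership test) by a binary
-- search over the sorted disjoint region list plus a single rsID-map fallback; objective: alternative.

-- Shared module-level data (identical constants in both Python files).
def pvPharmacogeneRegions : PySem.Dict String (List (Int × Int × String)) :=
  PySem.Dict.ofList [
    ("chr10", [(94727000, 94833000, "CYP2C9"), (96445000, 96615000, "CYP2C19")]),
    ("chr13", [(48004000, 48101000, "DPYD")]),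
    ("chr16", [(31090000, 31120000, "VKORC1")]),
    ("chr22", [(42120000, 42140000, "CYP2D6")]),
    ("chr7",  [(99648000, 99700000, "CYP3A5")]),
    ("chr6",  [(18128000, 18155000, "TPMT")]),
    ("chr12", [(21130000, 21240000, "SLCO1B1")])]

def pvRsidGeneMap : PySem.Dict String String :=
  PySem.Dict.ofList [
    ("rs3892097", "CYP2D6"), ("rs1065852", "CYP2D6"), ("rs1135840", "CYP2D6"),
    ("rs16947", "CYP2D6"), ("rs28371725", "CYP2D6"), ("rs5030655", "CYP2D6"),
    ("rs5030656", "CYP2D6"), ("rs28371706", "CYP2D6"), ("rs59421388", "CYP2D6"),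
    ("rs12248560", "CYP2C19"), ("rs4244285", "CYP2C19"),
    ("rs4986893", "CYP2C19"), ("rs28399504", "CYP2C19"), ("rs56337013", "CYP2C19"),
    ("rs1799853", "CYP2C9"), ("rs1057910", "CYP2C9"), ("rs28371686", "CYP2C9"),
    ("rs7900194", "CYP2C9"), ("rs9332131", "CYP2C9"),
    ("rs776746", "CYP3A5"),
    ("rs3918290", "DPYD"), ("rs55886062", "DPYD"),
    ("rs67376798", "DPYD"), ("rs75017182", "DPYD"),
    ("rs1142345", "TPMT"), ("rs1800460", "TPMT"), ("rs1800462", "TPMT"),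
    ("rs4149056", "SLCO1B1"), ("rs2306283", "SLCO1B1"),
    ("rs9923231", "VKORC1"), ("rs116855232", "VKORC1")]

-- ===== PORT A =====
-- A's set literal KNOWN_PGX_RSIDS, in source order.
def pvKnownPgxRsids : PySem.Set String :=
  PySem.Set.ofList [
    "rs3892097", "rs1065852", "rs1135840", "rs16947", "rs28371725",
    "rs5030655", "rs5030656", "rs28371706", "rs59421388",
    "rs12248560", "rs4244285", "rs4986893", "rs28399504", "rs56337013",
    "rs1799853", "rs1057910", "rs28371686", "rs7900194", "rs9332131",
    "rs776746",
    "rs3918290", "rs55886062", "rs67376798", "rs75017182",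
    "rs1142345", "rs1800460", "rs1800462",
    "rs4149056", "rs2306283",
    "rs9923231", "rs116855232"]

-- A's helper _rsid_to_gene
def pvRsidToGene (rsid : String) : String := PySem.Dict.getD pvRsidGeneMap rsid ""

-- A's 'for start, end, gene in regions: if start <= pos <= end: return gene' loop;
-- returns none when the loop falls through (the loop appears twice in A).
def pvRegionLoopA (regions : List (Int × Int × String)) (pos : Int) : Option String :=
  match regions with
  | [] => none
  | (s, e, g) :: rest => if s ≤ pos ∧ pos ≤ e then some g else pvRegionLoopA rest pos

def map_to_pharmacogene_py (chrom : String) (pos : Int) (rsid : String) : String :=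
  if PySem.Set.contains pvKnownPgxRsids rsid then
    match pvRegionLoopA (PySem.Dict.getD pvPharmacogeneRegions chrom []) pos with
    | some gene => gene
    | none => pvRsidToGene rsid
  else
    match pvRegionLoopA (PySem.Dict.getD pvPharmacogeneRegions chrom []) pos with
    | some gene => gene
    | none => ""

-- ===== PORT B =====
-- B's 'while lo < hi' binary-search loop (rightmost index with regions[mid].start <= pos).
def pvBsearchB (regions : List (Int × Int × String)) (pos : Int) (lo hi : Nat) : Nat :=
  if _h : lo < hi then
    let mid := (lo + hi) / 2
    match regions[mid]? with
    | some t => if t.1 ≤ pos then pvBsearchB regions pos (mid + 1) hi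
                else pvBsearchB regions pos lo mid
    | none => lo   -- unreachable: mid < hi ≤ len(regions); Python never indexes out of range here
  else lo
termination_by hi - lo
decreasing_by all_goals omega

def map_to_pharmacogene_py_alt (chrom : String) (pos : Int) (rsid : String) : String :=
  let regions := PySem.Dict.getD pvPharmacogeneRegions chrom []
  let lo := pvBsearchB regions pos 0 regions.length
  if 0 < lo then
    match regions[lo - 1]? with
    | some (_s, e, gene) => if pos ≤ e then gene else PySem.Dict.getD pvRsidGeneMap rsid ""
    | none => PySem.Dict.getD pvRsidGeneMap rsid ""   -- unreachable: lo - 1 < len(regions)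
  else
    PySem.Dict.getD pvRsidGeneMap rsid ""

-- ===== PRECONDITION & SPEC =====
def Spec_map_to_pharmacogene_py (chrom : String) (pos : Int) (rsid : String) (out : String) : Prop := out = map_to_pharmacogene_py_alt chrom pos rsid
instance (chrom : String) (pos : Int) (rsid : String) (out : String) : Decidable (Spec_map_to_pharmacogene_py chrom pos rsid out) := by unfold Spec_map_to_pharmacogene_py; infer_instance

-- ===== CLAIM (what is proved, stated in full; the proofs are below) =====
def Claim_equal_map_to_pharmacogene_py : Prop := ∀ (chrom : String) (pos : Int) (rsid : String), Dom_map_to_pharmacogene_py chrom pos rsid → Spec_map_to_pharmacogene_py chrom pos rsid (map_to_pharmacogene_py chrom pos rsid)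

-- ===== LEMMAS AND PROOFS =====

-- The keys of _rsid_to_gene's map are exactly KNOWN_PGX_RSIDS (checked on the literals).
theorem contains_map_eq_contains_set (rsid : String) :
    PySem.Dict.contains pvRsidGeneMap rsid = PySem.Set.contains pvKnownPgxRsids rsid := by
  have h : pvRsidGeneMap.keys = (pvKnownPgxRsids : List String) := by decide
  rw [PySem.Dict.contains_eq_decide_mem_keys, h, PySem.Set.contains_eq_listContains,
    List.contains_eq_mem]

-- A's two-branch fallback equals B's single map lookup.
theorem fallback_eq (rsid : String) :
    (if PySem.Set.contains pvKnownPgxRsids rsid then pvRsidToGene rsid else "")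
      = PySem.Dict.getD pvRsidGeneMap rsid "" := by
  by_cases hK : PySem.Set.contains pvKnownPgxRsids rsid = true
  · rw [if_pos hK]; rfl
  · have hK' : PySem.Set.contains pvKnownPgxRsids rsid = false := Bool.eq_false_iff.mpr hK
    rw [if_neg hK,
      PySem.Dict.getD_of_not_contains _ _ ((contains_map_eq_contains_set rsid).trans hK')]

-- A restructured: the region loop once, then the common fallback.
theorem A_restructure (chrom : String) (pos : Int) (rsid : String) :
    map_to_pharmacogene_py chrom pos rsid
      = (match pvRegionLoopA (PySem.Dict.getD pvPharmacogeneRegions chrom []) pos with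
         | some gene => gene
         | none => PySem.Dict.getD pvRsidGeneMap rsid "") := by
  unfold map_to_pharmacogene_py
  rw [← fallback_eq rsid]
  by_cases hK : PySem.Set.contains pvKnownPgxRsids rsid = true <;>
    cases pvRegionLoopA (PySem.Dict.getD pvPharmacogeneRegions chrom []) pos <;>
    simp

-- getD on the concrete region dict yields [] or one of its seven value lists.
theorem regions_cases (chrom : String) :
    PySem.Dict.getD pvPharmacogeneRegions chrom [] = ([] : List (Int × Int × String))
    ∨ ∃ k, (k, PySem.Dict.getD pvPharmacogeneRegions chrom []) ∈ pvPharmacogeneRegions.items := by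
  rw [PySem.Dict.getD_eq_get?_getD]
  cases h : pvPharmacogeneRegions.get? chrom with
  | none => left; rfl
  | some R =>
    right
    exact ⟨chrom, by simpa using PySem.Dict.mem_items_of_get?_eq_some pvPharmacogeneRegions h⟩

-- The binary-search loop on concrete bounds: termination case and the two list shapes.
theorem bs_stop (R : List (Int × Int × String)) (pos : Int) (lo : Nat) :
    pvBsearchB R pos lo lo = lo := by
  rw [pvBsearchB]; simp

theorem bs1 (t : Int × Int × String) (pos : Int) :
    pvBsearchB [t] pos 0 1 = if t.1 ≤ pos then 1 else 0 := by
  rw [pvBsearchB]; simp [bs_stop]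

theorem bs2' (t1 t2 : Int × Int × String) (pos : Int) :
    pvBsearchB [t1, t2] pos 0 1 = if t1.1 ≤ pos then 1 else 0 := by
  rw [pvBsearchB]; simp [bs_stop]

theorem bs2 (t1 t2 : Int × Int × String) (pos : Int) :
    pvBsearchB [t1, t2] pos 0 2 = if t2.1 ≤ pos then 2 else if t1.1 ≤ pos then 1 else 0 := by
  rw [pvBsearchB]; simp [bs_stop, bs2']

-- Key lemma, proved per concrete region list: A's first-hit scan agrees with B's
-- binary-search-then-check tail on every value getD can return.
theorem tail_eq (R : List (Int × Int × String)) (pos : Int) (rsid : String)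
    (hR : R = [] ∨ ∃ k, (k, R) ∈ pvPharmacogeneRegions.items) :
    (match pvRegionLoopA R pos with
     | some gene => gene
     | none => PySem.Dict.getD pvRsidGeneMap rsid "")
      = (let lo := pvBsearchB R pos 0 R.length
         if 0 < lo then
           match R[lo - 1]? with
           | some (_s, e, gene) => if pos ≤ e then gene else PySem.Dict.getD pvRsidGeneMap rsid ""
           | none => PySem.Dict.getD pvRsidGeneMap rsid ""
         else PySem.Dict.getD pvRsidGeneMap rsid "") := by
  have hv : pvPharmacogeneRegions.items
      = [("chr10", [((94727000 : Int), (94833000 : Int), "CYP2C9"), (96445000, 96615000, "CYP2C19")]),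
         ("chr13", [(48004000, 48101000, "DPYD")]),
         ("chr16", [(31090000, 31120000, "VKORC1")]),
         ("chr22", [(42120000, 42140000, "CYP2D6")]),
         ("chr7",  [(99648000, 99700000, "CYP3A5")]),
         ("chr6",  [(18128000, 18155000, "TPMT")]),
         ("chr12", [(21130000, 21240000, "SLCO1B1")])] := by decide
  rw [hv] at hR
  simp only [List.mem_cons, List.not_mem_nil, or_false, Prod.mk.injEq] at hR
  rcases hR with h | ⟨k, h⟩
  · subst h; simp [pvRegionLoopA, bs_stop]
  · rcases h with ⟨_,h⟩|⟨_,h⟩|⟨_,h⟩|⟨_,h⟩|⟨_,h⟩|⟨_,h⟩|⟨_,h⟩ <;> subst h <;>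
      simp only [pvRegionLoopA, List.length_cons, List.length_nil, Nat.reduceAdd, bs1, bs2] <;>
      split_ifs <;> simp_all <;> omega

-- ===== VERDICT (by name: the statement is the Claim_ definition above) =====
theorem map_to_pharmacogene_py_spec : Claim_equal_map_to_pharmacogene_py := by
  intro chrom pos rsid _
  unfold Spec_map_to_pharmacogene_py map_to_pharmacogene_py_alt
  rw [A_restructure]
  exact tail_eq _ pos rsid (regions_cases chrom)
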